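-- pv_equiv track=rewrite | github.com/bioinformagica/salmonella-bacterial-immunity | workflow/scripts/process_icity.py | assign_loci_id
-- ===== SOURCE A (Python) =====
-- def assign_loci_id(bait_assign_iter):
--     current_loci_index = 1
--     is_inside_loci = False
--
--     for description in bait_assign_iter:
--
--         if not description and is_inside_loci:
--             current_loci_index += 1
--
--         if not description:
--             is_inside_loci = False
--             yield None
--             continue
--
--         is_inside_loci = True
--         yield 'loci_{}'.format(str(current_loci_index))
-- ===== SOURCE B (Python) =====
-- def assign_loci_id(bait_assign_iter):
--     # Two-stage run-length pass: (1) materialise the input and compress it into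
--     # runs of equal truthiness with a two-pointer scan; (2) emit one label per
--     # run element, bumping the loci counter once per truthy run.
--     xs = list(bait_assign_iter)
--     n = len(xs)
--     runs = []
--     i = 0
--     while i < n:
--         t = bool(xs[i])
--         j = i
--         while j < n and bool(xs[j]) == t:
--             j += 1
--         runs.append((t, j - i))
--         i = j
--     k = 0
--     for t, m in runs:
--         if t:
--             k += 1
--         label = 'loci_{}'.format(k) if t else None
--         for _ in range(m):
--             yield label
-- ===== Notes on version B (the rewrite author's own statement) =====
-- stated objective: alternative
-- what changed: B replaces A's per-element boolean state machine (is_inside_loci / counter bumped at run ends) with a two-stage pass: a two-pointer scan compresses the input into run-length-encoded (truthiness, length) runs, then a second pass emits one label per run element, bumping the loci counter once per truthy run.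
import Mathlib
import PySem

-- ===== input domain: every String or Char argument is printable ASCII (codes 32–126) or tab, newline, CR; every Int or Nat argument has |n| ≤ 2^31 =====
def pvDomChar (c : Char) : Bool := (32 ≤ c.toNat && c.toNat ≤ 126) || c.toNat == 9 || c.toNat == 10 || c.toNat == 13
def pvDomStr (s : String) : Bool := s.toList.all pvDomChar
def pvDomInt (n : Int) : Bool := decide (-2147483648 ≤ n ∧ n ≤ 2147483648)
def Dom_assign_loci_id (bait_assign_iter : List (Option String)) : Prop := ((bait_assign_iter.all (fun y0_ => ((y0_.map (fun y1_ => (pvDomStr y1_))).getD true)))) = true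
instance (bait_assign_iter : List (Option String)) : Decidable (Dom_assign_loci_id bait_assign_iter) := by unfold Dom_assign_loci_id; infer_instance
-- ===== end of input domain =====

-- B replaces A's per-element state machine with a two-stage run-length-encoding pass
-- (alternative decomposition); both Pythons are generators and B materialises its input first —
-- the equivalence proved is about the returned sequence of values.

-- ===== PORT A =====
-- Python truthiness of an Option String: None and "" are falsy.
def pyTruthy (d : Option String) : Bool :=
  match d with
  | none => false
  | some s => !(s == "")

def assignLociGoA : List (Option String) → Int → Bool → List (Option String)
  | [], _, _ => []
  | d :: rest, current_loci_index, is_inside_loci =>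
    let current_loci_index :=
      if !pyTruthy d && is_inside_loci then current_loci_index + 1 else current_loci_index
    if !pyTruthy d then
      none :: assignLociGoA rest current_loci_index false
    else
      some ("loci_" ++ PySem.Int.toStr current_loci_index) :: assignLociGoA rest current_loci_index true

def assign_loci_id (bait_assign_iter : List (Option String)) : List (Option String) :=
  assignLociGoA bait_assign_iter 1 false

-- ===== PORT B =====
-- inner while loop of Source B: advance j while xs[j] has truthiness t
def innerJ (xs : List (Option String)) (n : Nat) (t : Bool) (j : Nat) : Nat :=
  if _h : j < n ∧ pyTruthy (xs.getD j none) = t then innerJ xs n t (j + 1) else j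
termination_by n - j
decreasing_by omega

theorem innerJ_ge (xs : List (Option String)) (n : Nat) (t : Bool) (j : Nat) :
    j ≤ innerJ xs n t j := by
  unfold innerJ
  split
  · exact le_trans (Nat.le_succ j) (innerJ_ge xs n t (j + 1))
  · exact le_refl j
termination_by n - j
decreasing_by omega

-- outer while loop of Source B: collect (truthiness, run length) pairs
def outerRuns (xs : List (Option String)) (n : Nat) (i : Nat) : List (Bool × Nat) :=
  if h : i < n then
    let t := pyTruthy (xs.getD i none)
    let j := innerJ xs n t i
    (t, j - i) :: outerRuns xs n j
  else []
termination_by n - i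
decreasing_by
  have h1 := innerJ_ge xs n (pyTruthy (xs.getD i none)) (i + 1)
  have h2 : innerJ xs n (pyTruthy (xs.getD i none)) i
      = innerJ xs n (pyTruthy (xs.getD i none)) (i + 1) := by
    conv_lhs => rw [innerJ]
    exact dif_pos ⟨h, rfl⟩
  omega

-- second stage of Source B: emit run-length labels
def emitRuns : List (Bool × Nat) → Int → List (Option String)
  | [], _ => []
  | (t, m) :: rest, k =>
    let k := if t then k + 1 else k
    let label := if t then some ("loci_" ++ PySem.Int.toStr k) else none
    List.replicate m label ++ emitRuns rest k

def assign_loci_id_alt (bait_assign_iter : List (Option String)) : List (Option String) :=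
  emitRuns (outerRuns bait_assign_iter bait_assign_iter.length 0) 0

-- ===== PRECONDITION & SPEC =====
def Spec_assign_loci_id (bait_assign_iter : List (Option String)) (out : List (Option String)) : Prop := out = assign_loci_id_alt bait_assign_iter
instance (bait_assign_iter : List (Option String)) (out : List (Option String)) : Decidable (Spec_assign_loci_id bait_assign_iter out) := by unfold Spec_assign_loci_id; infer_instance

-- ===== CLAIM (what is proved, stated in full; the proofs are below) =====
def Claim_equal_assign_loci_id : Prop := ∀ (bait_assign_iter : List (Option String)), Dom_assign_loci_id bait_assign_iter → Spec_assign_loci_id bait_assign_iter (assign_loci_id bait_assign_iter)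

-- ===== LEMMAS AND PROOFS =====

theorem innerJ_le (xs : List (Option String)) (n : Nat) (t : Bool) (j : Nat)
    (hj : j ≤ n) : innerJ xs n t j ≤ n := by
  unfold innerJ
  split
  · rename_i h
    exact innerJ_le xs n t (j + 1) h.1
  · exact hj
termination_by n - j
decreasing_by omega

theorem dropWhile_eq_drop_len_takeWhile {α : Type} (p : α → Bool) (l : List α) :
    l.dropWhile p = l.drop (l.takeWhile p).length := by
  induction l with
  | nil => simp
  | cons d rest ih =>
    by_cases h : p d = true <;>
      simp [h, ih]

-- Structural (takeWhile/dropWhile) characterisation of Source B's run splitter.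
def runsStruct : List (Option String) → List (Bool × Nat)
  | [] => []
  | d :: rest =>
    let t := pyTruthy d
    (t, ((d :: rest).takeWhile (fun x => pyTruthy x == t)).length)
      :: runsStruct ((d :: rest).dropWhile (fun x => pyTruthy x == t))
termination_by l => l.length
decreasing_by
  simp only [List.dropWhile_cons]
  split
  · exact Nat.lt_succ_of_le (List.length_dropWhile_le _ _)
  · simp_all

theorem innerJ_spec (xs : List (Option String)) (t : Bool) (j : Nat) :
    innerJ xs xs.length t j
      = j + ((xs.drop j).takeWhile (fun x => pyTruthy x == t)).length := by
  rw [innerJ]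
  split
  · rename_i h
    obtain ⟨h1, h2⟩ := h
    rw [innerJ_spec xs t (j + 1)]
    rw [List.drop_eq_getElem_cons h1, List.takeWhile_cons]
    rw [List.getD_eq_getElem xs none h1] at h2
    simp [h2]
    omega
  · rename_i h
    by_cases hl : j < xs.length
    · have h2 : ¬ pyTruthy (xs.getD j none) = t := fun hc => h ⟨hl, hc⟩
      rw [List.drop_eq_getElem_cons hl, List.takeWhile_cons]
      rw [List.getD_eq_getElem xs none hl] at h2
      simp [h2]
    · rw [List.drop_eq_nil_of_le (by omega)]; simp
termination_by xs.length - j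
decreasing_by omega

theorem outerRuns_spec (xs : List (Option String)) (i : Nat) :
    outerRuns xs xs.length i = runsStruct (xs.drop i) := by
  rw [outerRuns]
  split
  · rename_i h
    have hget : xs.getD i none = xs[i] := List.getD_eq_getElem xs none h
    have hdrop : xs.drop i = xs[i] :: xs.drop (i + 1) := List.drop_eq_getElem_cons h
    have hj := innerJ_spec xs (pyTruthy (xs.getD i none)) i
    have hgt : i < innerJ xs xs.length (pyTruthy (xs.getD i none)) i := by
      conv_rhs => rw [innerJ]
      rw [dif_pos ⟨h, rfl⟩]
      have := innerJ_ge xs xs.length (pyTruthy (xs.getD i none)) (i + 1)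
      omega
    have hle := innerJ_le xs xs.length (pyTruthy (xs.getD i none)) i (le_of_lt h)
    conv_rhs => rw [hdrop, runsStruct]
    rw [← hdrop, ← hget]
    have hrec := outerRuns_spec xs (innerJ xs xs.length (pyTruthy (xs.getD i none)) i)
    have hlen2 : innerJ xs xs.length (pyTruthy (xs.getD i none)) i - i
        = ((xs.drop i).takeWhile
            (fun x => pyTruthy x == pyTruthy (xs.getD i none))).length := by
      rw [hj]; omega
    dsimp only
    rw [hlen2, hrec, dropWhile_eq_drop_len_takeWhile, List.drop_drop, ← hj]
  · rename_i h
    rw [List.drop_eq_nil_of_le (by omega), runsStruct]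
termination_by xs.length - i
decreasing_by omega

-- A over a falsy run while outside a loci: yields none, state (idx, false) preserved.
theorem A_false_run (p l₂ : List (Option String)) (idx : Int)
    (hp : ∀ x ∈ p, pyTruthy x = false) :
    assignLociGoA (p ++ l₂) idx false
      = List.replicate p.length none ++ assignLociGoA l₂ idx false := by
  induction p with
  | nil => simp
  | cons d p ih =>
    have hd : pyTruthy d = false := hp d (by simp)
    have ih' := ih fun x hx => hp x (by simp [hx])
    simp [assignLociGoA, hd, ih', List.replicate_succ]

-- A over a truthy run while already inside it.
theorem A_true_run' (p l₂ : List (Option String)) (idx : Int)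
    (hp : ∀ x ∈ p, pyTruthy x = true) :
    assignLociGoA (p ++ l₂) idx true
      = List.replicate p.length (some ("loci_" ++ PySem.Int.toStr idx))
          ++ assignLociGoA l₂ idx true := by
  induction p with
  | nil => simp
  | cons d p ih =>
    have hd : pyTruthy d = true := hp d (by simp)
    have ih' := ih fun x hx => hp x (by simp [hx])
    simp [assignLociGoA, hd, ih', List.replicate_succ]

theorem head_dropWhile_false {α : Type} (p : α → Bool) (l : List α) (y : α) (ys : List α)
    (h : l.dropWhile p = y :: ys) : p y = false := by
  induction l with
  | nil => simp at h
  | cons d rest ih =>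
    rw [List.dropWhile_cons] at h
    split at h
    · exact ih h
    · rename_i hd
      cases h
      simpa using hd

-- Main coupling of A's state machine with the run-length description: G1 couples the
-- outside-a-run state (counter k+1) with emitRuns counter k; G2 the inside-a-run state.
theorem mainAux (n : Nat) : ∀ (l : List (Option String)), l.length ≤ n → ∀ (k : Int),
    (assignLociGoA l (k + 1) false = emitRuns (runsStruct l) k) ∧
      ((l = [] ∨ pyTruthy (l.headD none) = false) →
        assignLociGoA l (k + 1) true = emitRuns (runsStruct l) (k + 1)) := by
  induction n with
  | zero =>
    intro l hlen k
    have : l = [] := List.eq_nil_of_length_eq_zero (Nat.le_zero.mp hlen)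
    subst this
    simp [runsStruct, emitRuns, assignLociGoA]
  | succ n ih =>
    intro l hlen k
    cases l with
    | nil => simp [runsStruct, emitRuns, assignLociGoA]
    | cons d rest =>
      set f : Option String → Bool := fun x => pyTruthy x == pyTruthy d with hf
      have hsplit : ((d :: rest).takeWhile f) ++ ((d :: rest).dropWhile f) = d :: rest :=
        List.takeWhile_append_dropWhile
      have hall : ∀ x ∈ (d :: rest).takeWhile f, pyTruthy x = pyTruthy d := by
        intro x hx
        have := List.mem_takeWhile_imp hx
        rw [hf] at this; simpa using this
      have hp : (d :: rest).takeWhile f = d :: rest.takeWhile f := by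
        rw [List.takeWhile_cons, hf]; simp
      have hallrest : ∀ x ∈ rest.takeWhile f, pyTruthy x = pyTruthy d := by
        intro x hx
        exact hall x (by rw [hp]; exact List.mem_cons_of_mem d hx)
      have hl'len : ((d :: rest).dropWhile f).length ≤ n := by
        rw [List.dropWhile_cons]
        have hfd : f d = true := by rw [hf]; simp
        rw [if_pos hfd]
        have := List.length_dropWhile_le f rest
        simpa using Nat.le_trans this (Nat.le_of_succ_le_succ hlen)
      have hhead : ∀ y ys, (d :: rest).dropWhile f = y :: ys → pyTruthy y = !pyTruthy d := by
        intro y ys he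
        have hnp := head_dropWhile_false f (d :: rest) y ys he
        rw [hf] at hnp; simp at hnp
        cases hdt : pyTruthy d <;> cases hy : pyTruthy y <;> simp_all
      have hruns : runsStruct (d :: rest)
          = (pyTruthy d, ((d :: rest).takeWhile f).length)
            :: runsStruct ((d :: rest).dropWhile f) := by
        rw [runsStruct]
      have hihG1 := fun k' => (ih _ hl'len k').1
      have hihG2 := fun k' => (ih _ hl'len k').2
      constructor
      · -- G1: outside a run, counter k+1, emit counter k
        rw [hruns]
        cases ht : pyTruthy d with
        | false =>
          conv_lhs => rw [← hsplit]
          rw [A_false_run _ _ _ (fun x hx => by rw [hall x hx, ht])]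
          simp only [emitRuns]
          rw [hihG1 k]
          simp
        | true =>
          have hstep : assignLociGoA (d :: (rest.takeWhile f ++ (d :: rest).dropWhile f))
              (k + 1) false
              = some ("loci_" ++ PySem.Int.toStr (k + 1))
                  :: assignLociGoA (rest.takeWhile f ++ (d :: rest).dropWhile f) (k + 1) true := by
            simp [assignLociGoA, ht]
          conv_lhs => rw [← hsplit, hp, List.cons_append]
          rw [hstep, A_true_run' _ _ _ (fun x hx => by rw [hallrest x hx, ht])]
          have hG2 := hihG2 k (by
            cases he : (d :: rest).dropWhile f with
            | nil => exact Or.inl rfl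
            | cons y ys =>
              right
              have hy := hhead y ys he
              rw [ht] at hy
              simp [hy])
          rw [hG2]
          simp [emitRuns, hp, List.replicate_succ]
      · -- G2: inside a run (counter k+1), head falsy
        intro hh
        have ht : pyTruthy d = false := by
          rcases hh with hh | hh
          · cases hh
          · simpa using hh
        rw [hruns]
        have hstep : assignLociGoA (d :: (rest.takeWhile f ++ (d :: rest).dropWhile f))
            (k + 1) true
            = none :: assignLociGoA (rest.takeWhile f ++ (d :: rest).dropWhile f)
                (k + 1 + 1) false := by
          simp [assignLociGoA, ht]
        conv_lhs => rw [← hsplit, hp, List.cons_append]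
        rw [hstep, A_false_run _ _ _ (fun x hx => by rw [hallrest x hx, ht]), hihG1 (k + 1)]
        simp [emitRuns, ht, hp, List.replicate_succ]

-- ===== VERDICT (by name: the statement is the Claim_ definition above) =====
theorem assign_loci_id_spec : Claim_equal_assign_loci_id := by
  intro l _
  unfold Spec_assign_loci_id assign_loci_id assign_loci_id_alt
  rw [outerRuns_spec l 0, List.drop_zero]
  have h := (mainAux l.length l (le_refl _) 0).1
  simpa using h
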